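-- pv_equiv track=rewrite | github.com/Ipsedo/Projet_bAbI | data/data_processingqa20.py | mk_utils
-- ===== SOURCE A (Python) =====
-- def mk_utils(data):
-- 	l1 = []
-- 	l2 = []
-- 	res = []
-- 	resF = [0]
-- 	res.append(0)
-- 	for i in range(len(data)):
-- 		l1.append(data[i][0])
-- 	for j in range(len(data) - 1):
-- 		l2.append(data[j+1][0])
-- 	for i in range(len(l2)):
-- 		if int(l1[i]) > int(l2[i]):
-- 			res.append(int(l1[i]))
-- 		if i == len(l2)-1:
-- 			res.append(int(l2[i]))
-- 	for i in range(len(res)-1):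
-- 		resF.append(res[i+1] + resF[i])
-- 	del resF[-1]
-- 	del res[0]
-- 	return resF, res
-- ===== SOURCE B (Python) =====
-- def mk_utils(data):
--     # One pass over adjacent rows with a running total instead of the
--     # l1/l2 scaffolding plus a separate prefix-sum loop.
--     resF = []
--     res = []
--     if len(data) < 2:
--         return resF, res
--     total = 0
--     for cur_row, nxt_row in zip(data, data[1:]):
--         cur = int(cur_row[0])
--         nxt = int(nxt_row[0])
--         if cur > nxt:
--             resF.append(total)
--             res.append(cur)
--             total += cur
--     resF.append(total)
--     res.append(int(data[-1][0]))
--     return resF, res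
-- ===== Notes on version B (the rewrite author's own statement) =====
-- stated objective: simpler
-- what changed: Replaced A's four index loops over the scaffolding lists l1/l2 plus a separate prefix-sum pass (with trailing del fixups) by a single pass over zip(data, data[1:]) that threads a running total, emitting the exclusive prefix sum and the selected value together.
import Mathlib
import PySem

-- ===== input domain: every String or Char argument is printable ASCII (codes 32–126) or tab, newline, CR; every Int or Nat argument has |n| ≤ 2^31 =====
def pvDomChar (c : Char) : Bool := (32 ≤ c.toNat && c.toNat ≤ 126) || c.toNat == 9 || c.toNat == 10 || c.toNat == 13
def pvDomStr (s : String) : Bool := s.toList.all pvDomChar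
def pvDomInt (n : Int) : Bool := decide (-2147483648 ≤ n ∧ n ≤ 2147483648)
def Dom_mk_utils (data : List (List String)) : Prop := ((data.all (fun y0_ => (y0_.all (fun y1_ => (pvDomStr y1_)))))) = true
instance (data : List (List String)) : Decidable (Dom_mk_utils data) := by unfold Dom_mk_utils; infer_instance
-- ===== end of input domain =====

-- B replaces A's four index loops over the scaffolding lists l1/l2 and the separate
-- prefix-sum pass by a single pass over adjacent pairs threading a running total (objective: simpler).

-- ===== PORT A =====
-- Literal transliteration of A.  data[i][0] / int(...) use pyGetD / (ofStr? ...).getD 0;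
-- the defaults are unreachable under Pre_mk_utils (Python raises IndexError/ValueError there).
-- del resF[-1] / del res[0] are dropLast / drop 1 (both lists are provably nonempty there).
def mk_utils (data : List (List String)) : List Int × List Int :=
  let l1 := (PySem.List.pyRange 0 (data.length : Int) 1).foldl
      (fun acc i => acc ++ [PySem.List.pyGetD (PySem.List.pyGetD data i []) 0 ""]) ([] : List String)
  let l2 := (PySem.List.pyRange 0 ((data.length : Int) - 1) 1).foldl
      (fun acc j => acc ++ [PySem.List.pyGetD (PySem.List.pyGetD data (j + 1) []) 0 ""]) ([] : List String)
  let res := (PySem.List.pyRange 0 (l2.length : Int) 1).foldl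
      (fun acc i =>
        let acc' := if (PySem.Int.ofStr? (PySem.List.pyGetD l2 i "")).getD 0 <
                       (PySem.Int.ofStr? (PySem.List.pyGetD l1 i "")).getD 0
                    then acc ++ [(PySem.Int.ofStr? (PySem.List.pyGetD l1 i "")).getD 0] else acc
        if i = (l2.length : Int) - 1
        then acc' ++ [(PySem.Int.ofStr? (PySem.List.pyGetD l2 i "")).getD 0] else acc')
      ([0] : List Int)
  let resF := (PySem.List.pyRange 0 ((res.length : Int) - 1) 1).foldl
      (fun acc i => acc ++ [PySem.List.pyGetD res (i + 1) 0 + PySem.List.pyGetD acc i 0]) ([0] : List Int)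
  (resF.dropLast, res.drop 1)

-- ===== PORT B =====
-- Transliteration of Source B: one fold over zip(data, data[1:]) carrying (resF, res, total).
def mk_utils_alt (data : List (List String)) : List Int × List Int :=
  if data.length < 2 then ([], []) else
    let st := (data.zip (data.drop 1)).foldl
      (fun (st : List Int × List Int × Int) p =>
        let cur := (PySem.Int.ofStr? (PySem.List.pyGetD p.1 0 "")).getD 0
        let nxt := (PySem.Int.ofStr? (PySem.List.pyGetD p.2 0 "")).getD 0
        if nxt < cur then (st.1 ++ [st.2.2], st.2.1 ++ [cur], st.2.2 + cur) else st)
      (([], [], 0) : List Int × List Int × Int)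
    (st.1 ++ [st.2.2],
     st.2.1 ++ [(PySem.Int.ofStr? (PySem.List.pyGetD (PySem.List.pyGetD data (-1) []) 0 "")).getD 0])

-- ===== PRECONDITION & SPEC =====
-- Pre_ = exactly where Python A returns: every row is nonempty (else data[i][0] is an
-- IndexError) and, when there are at least two rows, every row's first entry parses as an
-- int (else int(...) is a ValueError; with fewer than two rows int() is never called).
def Pre_mk_utils (data : List (List String)) : Prop :=
  (data.all (fun row => !row.isEmpty)) = true ∧
  (2 ≤ data.length →
    (data.all (fun row => (PySem.Int.ofStr? (row.headD "")).isSome)) = true)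
instance (data : List (List String)) : Decidable (Pre_mk_utils data) := by
  unfold Pre_mk_utils; infer_instance
def pvWitness_mk_utils : List (List String) := [["3"], ["1", "x"], ["2"]]
def Spec_mk_utils (data : List (List String)) (out : List Int × List Int) : Prop := out = mk_utils_alt data
instance (data : List (List String)) (out : List Int × List Int) : Decidable (Spec_mk_utils data out) := by unfold Spec_mk_utils; infer_instance

-- ===== CLAIM (what is proved, stated in full; the proofs are below) =====
def Claim_equal_mk_utils : Prop := ∀ (data : List (List String)), Dom_mk_utils data → Pre_mk_utils data → Spec_mk_utils data (mk_utils data)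

-- ===== LEMMAS AND PROOFS =====

-- parsed int of a row's first entry (with the same unreachable defaults as the ports)
def pvVal (row : List String) : Int :=
  (PySem.Int.ofStr? (PySem.List.pyGetD row 0 "")).getD 0

-- exclusive running sums starting at t: exc t [v1,v2,…] = [t, t+v1, …] without the final total
def pvExc : Int → List Int → List Int
  | _, [] => []
  | t, v :: u => t :: pvExc (t + v) u

lemma pvExc_append (t : Int) (u : List Int) (x : Int) :
    pvExc t (u ++ [x]) = pvExc t u ++ [t + u.sum] := by
  induction u generalizing t with
  | nil => simp [pvExc]
  | cons v u ih => simp [pvExc, ih, add_assoc]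

lemma pvExc_length (t : Int) (u : List Int) : (pvExc t u).length = u.length := by
  induction u generalizing t with
  | nil => rfl
  | cons v u ih => simp [pvExc, ih]

-- (range (len u)).map (getD u) = u
lemma pvRangeGetD {α : Type} (u : List α) (d : α) :
    (List.range u.length).map (fun k => u.getD k d) = u := by
  induction u with
  | nil => rfl
  | cons x u ih =>
    simp only [List.length_cons, List.range_succ_eq_map, List.map_cons, List.map_map]
    exact congrArg (x :: ·) ih

-- (range (len u - 1)).map (fun k => getD u (k+1)) = u.drop 1
lemma pvRangeGetDShift {α : Type} (u : List α) (d : α) :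
    (List.range (u.length - 1)).map (fun k => u.getD (k + 1) d) = u.drop 1 := by
  cases u with
  | nil => rfl
  | cons x u => simpa using pvRangeGetD u d

-- adjacent pairs via indices = zip with the tail
lemma pvPairs (u : List Int) :
    (List.range (u.length - 1)).map (fun k => (u.getD k 0, u.getD (k + 1) 0)) =
      u.zip (u.drop 1) := by
  induction u with
  | nil => rfl
  | cons x u ih =>
    cases u with
    | nil => rfl
    | cons y v =>
      simp only [List.length_cons, Nat.add_sub_cancel, List.range_succ_eq_map,
        List.map_cons, List.map_map]
      simp only [List.length_cons, Nat.add_sub_cancel] at ih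
      simp only [List.getD_cons_zero, List.getD_cons_succ, List.zip_cons_cons, List.drop_succ_cons,
        List.drop_zero] at *
      exact congrArg ((x, y) :: ·) (by simpa [Function.comp] using ih)

-- the B-side fold invariant
lemma pvBfold (q : List (List String × List String)) (rF r : List Int) (t : Int) :
    q.foldl
      (fun (st : List Int × List Int × Int) p =>
        let cur := (PySem.Int.ofStr? (PySem.List.pyGetD p.1 0 "")).getD 0
        let nxt := (PySem.Int.ofStr? (PySem.List.pyGetD p.2 0 "")).getD 0
        if nxt < cur then (st.1 ++ [st.2.2], st.2.1 ++ [cur], st.2.2 + cur) else st)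
      (rF, r, t) =
    (rF ++ pvExc t ((q.filter (fun p => decide (pvVal p.2 < pvVal p.1))).map (fun p => pvVal p.1)),
     r ++ (q.filter (fun p => decide (pvVal p.2 < pvVal p.1))).map (fun p => pvVal p.1),
     t + ((q.filter (fun p => decide (pvVal p.2 < pvVal p.1))).map (fun p => pvVal p.1)).sum) := by
  induction q generalizing rF r t with
  | nil => simp [pvExc]
  | cons p q ih =>
    by_cases h : pvVal p.2 < pvVal p.1 <;>
      simp only [pvVal] at h <;>
      simp [h, ih, pvVal, pvExc, add_assoc]

-- the A-side prefix-sum fold: res = 0 :: vs gives [sums of prefixes of vs] ++ [total]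
lemma pvAscan (vs : List Int) (k : Nat) (hk : k ≤ vs.length) :
    (PySem.List.pyRange 0 (k : Int) 1).foldl
      (fun acc i => acc ++ [PySem.List.pyGetD (0 :: vs) (i + 1) 0 + PySem.List.pyGetD acc i 0])
      ([0] : List Int) =
    pvExc 0 (vs.take k) ++ [(vs.take k).sum] := by
  induction k with
  | zero => simp [PySem.List.pyRange_one_eq_nil, pvExc]
  | succ k ih =>
    have hk' : k ≤ vs.length := Nat.le_of_succ_le hk
    have hklt : k < vs.length := hk
    have hcast : ((k + 1 : Nat) : Int) = (k : Int) + 1 := by push_cast; ring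
    rw [hcast, PySem.List.pyRange_one_succ_right (by positivity), List.foldl_append,
      ih hk']
    simp only [List.foldl_cons, List.foldl_nil]
    have h1 : PySem.List.pyGetD (0 :: vs) ((k : Int) + 1) 0 = vs[k] := by
      have : ((k : Int) + 1) = ((k + 1 : Nat) : Int) := by push_cast; ring
      rw [this, PySem.List.pyGetD_natCast]
      simp [List.getD, List.getElem?_eq_getElem hklt]
    have h2 : PySem.List.pyGetD (pvExc 0 (vs.take k) ++ [(vs.take k).sum]) (k : Int) 0 =
        (vs.take k).sum := by
      rw [PySem.List.pyGetD_natCast]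
      have hlen : (pvExc 0 (vs.take k)).length = k := by
        rw [pvExc_length]; exact List.length_take_of_le hk'
      have hcl := List.getElem?_concat_length (l := pvExc 0 (vs.take k)) (a := (vs.take k).sum)
      rw [hlen] at hcl
      simp [List.getD, hcl]
    rw [h1, h2]
    have ht : vs.take (k + 1) = vs.take k ++ [vs[k]] := by
      rw [List.take_add_one, List.getElem?_eq_getElem hklt]; rfl
    rw [ht, pvExc_append, List.sum_append]
    simp [add_comm]

-- adjacent pairs via a pyRange over Int indices = zip with the tail
lemma pvPairsRange (ys : List Int) (m : Nat) (hm : ys.length = m + 1) :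
    (PySem.List.pyRange 0 (m : Int) 1).map
      (fun i => (PySem.List.pyGetD ys i 0, PySem.List.pyGetD (ys.drop 1) i 0)) =
    ys.zip (ys.drop 1) := by
  rw [PySem.List.pyRange_one, List.map_map]
  have h1 : ((m : Int) - 0).toNat = m := by omega
  rw [h1]
  have h2 : ∀ k ∈ List.range m,
      ((fun i => (PySem.List.pyGetD ys i 0, PySem.List.pyGetD (ys.drop 1) i 0)) ∘
        (fun k : Nat => (0 : Int) + ↑k)) k = (ys.getD k 0, ys.getD (k + 1) 0) := by
    intro k _
    simp [PySem.List.pyGetD_natCast]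
  rw [List.map_congr_left h2]
  have h3 : m = ys.length - 1 := by omega
  rw [h3]
  exact pvPairs ys

-- the filtered/mapped index selection over the range = selection over the zipped pairs
lemma pvSelRange (ys : List Int) (m : Nat) (hm : ys.length = m + 1) :
    ((PySem.List.pyRange 0 (m : Int) 1).filter
        (fun i => decide (PySem.List.pyGetD (ys.drop 1) i 0 < PySem.List.pyGetD ys i 0))).map
      (fun i => PySem.List.pyGetD ys i 0) =
    ((ys.zip (ys.drop 1)).filter (fun p => decide (p.2 < p.1))).map Prod.fst := by
  rw [← pvPairsRange ys m hm, List.filter_map, List.map_map]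
  rfl

-- the third loop of A: res = 0 :: selected values ++ [value at the last index]
lemma pvAresLoop (ys : List Int) (m : Nat) (hm1 : 1 ≤ m) :
    (PySem.List.pyRange 0 (m : Int) 1).foldl
      (fun acc i =>
        let acc' := if PySem.List.pyGetD (ys.drop 1) i 0 < PySem.List.pyGetD ys i 0
                    then acc ++ [PySem.List.pyGetD ys i 0] else acc
        if i = (m : Int) - 1 then acc' ++ [PySem.List.pyGetD (ys.drop 1) i 0] else acc')
      ([0] : List Int) =
    0 :: (((PySem.List.pyRange 0 (m : Int) 1).filter
        (fun i => decide (PySem.List.pyGetD (ys.drop 1) i 0 < PySem.List.pyGetD ys i 0))).map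
        (fun i => PySem.List.pyGetD ys i 0)
      ++ [PySem.List.pyGetD (ys.drop 1) ((m : Int) - 1) 0]) := by
  have hsplit : PySem.List.pyRange 0 (m : Int) 1 =
      PySem.List.pyRange 0 ((m : Int) - 1) 1 ++ [(m : Int) - 1] := by
    have h := PySem.List.pyRange_one_succ_right (a := 0) (b := (m : Int) - 1)
      (by have : (1 : Int) ≤ (m : Int) := by exact_mod_cast hm1
          omega)
    have heq : (m : Int) - 1 + 1 = (m : Int) := by ring
    rwa [heq] at h
  rw [hsplit, List.foldl_append]
  have hcongr := PySem.List.foldl_congr_mem (PySem.List.pyRange 0 ((m : Int) - 1) 1)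
    (fun acc i =>
      let acc' := if PySem.List.pyGetD (ys.drop 1) i 0 < PySem.List.pyGetD ys i 0
                  then acc ++ [PySem.List.pyGetD ys i 0] else acc
      if i = (m : Int) - 1 then acc' ++ [PySem.List.pyGetD (ys.drop 1) i 0] else acc')
    (fun acc i =>
      if decide (PySem.List.pyGetD (ys.drop 1) i 0 < PySem.List.pyGetD ys i 0) = true
      then acc ++ [PySem.List.pyGetD ys i 0] else acc)
    ([0] : List Int)
    (by
      intro acc x hx
      have hxlt : x < (m : Int) - 1 := (PySem.List.mem_pyRange_one.mp hx).2
      simp only [if_neg (by omega : ¬ x = (m : Int) - 1)]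
      by_cases h : PySem.List.pyGetD (ys.drop 1) x 0 < PySem.List.pyGetD ys x 0
      · rw [if_pos h, if_pos (by simpa using h)]
      · rw [if_neg h, if_neg (by simpa using h)])
  rw [hcongr, PySem.List.foldl_append_if]
  simp only [List.foldl_cons, List.foldl_nil, List.filter_append, List.filter_cons,
    List.filter_nil, List.map_append]
  by_cases h : PySem.List.pyGetD ys.tail ((m : Int) - 1) 0 < PySem.List.pyGetD ys ((m : Int) - 1) 0 <;>
    simp [h, List.drop_one]

-- B in closed form (n ≥ 2)
lemma pvBclosed (data : List (List String)) (h : 2 ≤ data.length) :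
    mk_utils_alt data =
    (pvExc 0 (((data.zip (data.drop 1)).filter
        (fun p => decide (pvVal p.2 < pvVal p.1))).map (fun p => pvVal p.1)) ++
      [(((data.zip (data.drop 1)).filter
        (fun p => decide (pvVal p.2 < pvVal p.1))).map (fun p => pvVal p.1)).sum],
     ((data.zip (data.drop 1)).filter
        (fun p => decide (pvVal p.2 < pvVal p.1))).map (fun p => pvVal p.1) ++
      [pvVal (data.getLast (by intro hnil; simp [hnil] at h))]) := by
  have hnil : data ≠ [] := by intro hnil; simp [hnil] at h
  unfold mk_utils_alt
  rw [if_neg (by omega)]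
  simp only [pvBfold, List.nil_append, zero_add]
  rw [PySem.List.pyGetD_neg_one data [] hnil]
  simp [pvVal]

-- A in closed form
lemma pvAclosed (data : List (List String)) :
    mk_utils data =
    if h2 : 2 ≤ data.length then
    (pvExc 0 (((data.zip (data.drop 1)).filter
        (fun p => decide (pvVal p.2 < pvVal p.1))).map (fun p => pvVal p.1)) ++
      [(((data.zip (data.drop 1)).filter
        (fun p => decide (pvVal p.2 < pvVal p.1))).map (fun p => pvVal p.1)).sum],
     ((data.zip (data.drop 1)).filter
        (fun p => decide (pvVal p.2 < pvVal p.1))).map (fun p => pvVal p.1) ++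
      [pvVal (data.getLast (by intro hnil; simp [hnil] at h2))])
    else ([], []) := by
  have hiv : ∀ (xs : List String) (i : Int),
      (PySem.Int.ofStr? (PySem.List.pyGetD xs i "")).getD 0 =
      PySem.List.pyGetD (xs.map (fun s => (PySem.Int.ofStr? s).getD 0)) i 0 :=
    fun xs i => (PySem.List.pyGetD_map (fun s => (PySem.Int.ofStr? s).getD 0) xs i "").symm
  have hl1 : (PySem.List.pyRange 0 (data.length : Int) 1).foldl
      (fun acc i => acc ++ [PySem.List.pyGetD (PySem.List.pyGetD data i []) 0 ""])
      ([] : List String) = data.map (fun r => PySem.List.pyGetD r 0 "") := by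
    rw [PySem.List.foldl_append_singleton_eq_map, List.nil_append,
      show (fun i => PySem.List.pyGetD (PySem.List.pyGetD data i []) 0 "") =
        ((fun r => PySem.List.pyGetD r 0 "") ∘ (fun j => PySem.List.pyGetD data j [])) from rfl,
      ← List.map_map, PySem.List.map_pyGetD_pyRange_zero']
  have hl2 : (PySem.List.pyRange 0 ((data.length : Int) - 1) 1).foldl
      (fun acc j => acc ++ [PySem.List.pyGetD (PySem.List.pyGetD data (j + 1) []) 0 ""])
      ([] : List String) = (data.drop 1).map (fun r => PySem.List.pyGetD r 0 "") := by
    rw [PySem.List.foldl_append_singleton_eq_map, List.nil_append, PySem.List.pyRange_one,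
      List.map_map]
    have ht : (((data.length : Int) - 1) - 0).toNat = data.length - 1 := by omega
    rw [ht]
    rw [List.map_congr_left
      (g := fun k : Nat => (fun r => PySem.List.pyGetD r 0 "") (data.getD (k + 1) []))
      (by
        intro k _
        have hc : ((0 : Int) + (k : Int)) + 1 = ((k + 1 : Nat) : Int) := by push_cast; ring
        simp only [Function.comp]
        rw [hc, PySem.List.pyGetD_natCast])]
    rw [show (fun k : Nat => (fun r => PySem.List.pyGetD r 0 "") (data.getD (k + 1) [])) =
        ((fun r => PySem.List.pyGetD r 0 "") ∘ (fun k : Nat => data.getD (k + 1) [])) from rfl,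
      ← List.map_map, pvRangeGetDShift]
  simp only [mk_utils, hl1, hl2, List.length_map, List.length_drop]
  by_cases h2 : 2 ≤ data.length
  · rw [dif_pos h2]
    have hm1 : 1 ≤ data.length - 1 := by omega
    have hmlen : (data.map (fun r =>
        (PySem.Int.ofStr? (PySem.List.pyGetD r 0 "")).getD 0)).length = (data.length - 1) + 1 := by
      simp; omega
    simp only [hiv, List.map_map]
    rw [show ((fun s => (PySem.Int.ofStr? s).getD 0) ∘ (fun r => PySem.List.pyGetD r 0 "")) =
        (fun r => (PySem.Int.ofStr? (PySem.List.pyGetD r 0 "")).getD 0) from rfl]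
    rw [List.map_drop]
    rw [pvAresLoop (data.map fun r => (PySem.Int.ofStr? (PySem.List.pyGetD r 0 "")).getD 0)
      (data.length - 1) hm1]
    rw [pvSelRange (data.map fun r => (PySem.Int.ofStr? (PySem.List.pyGetD r 0 "")).getD 0)
      (data.length - 1) hmlen]
    simp only [List.length_cons, Nat.cast_add, Nat.cast_one, add_sub_cancel_right]
    rw [pvAscan _ _ (le_refl _), List.take_length, List.dropLast_concat, List.drop_succ_cons,
      List.drop_zero, pvExc_append, zero_add]
    have hV : List.map Prod.fst (List.filter (fun p => decide (p.2 < p.1))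
        ((data.map (fun r => (PySem.Int.ofStr? (PySem.List.pyGetD r 0 "")).getD 0)).zip
          (List.drop 1 (data.map (fun r => (PySem.Int.ofStr? (PySem.List.pyGetD r 0 "")).getD 0))))) =
        List.map (fun p => pvVal p.1)
          (List.filter (fun p => decide (pvVal p.2 < pvVal p.1)) (data.zip (List.drop 1 data))) := by
      rw [← List.map_drop, List.zip_map, List.filter_map, List.map_map]
      rfl
    have hbl : PySem.List.pyGetD
        (List.drop 1 (data.map (fun r => (PySem.Int.ofStr? (PySem.List.pyGetD r 0 "")).getD 0)))
        (((data.length - 1 : Nat) : Int) - 1) 0 =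
        pvVal (data.getLast (by intro hnil; simp [hnil] at h2)) := by
      rw [show ((data.length - 1 : Nat) : Int) - 1 = ((data.length - 2 : Nat) : Int) from by omega,
        PySem.List.pyGetD_natCast]
      simp only [List.getD, List.getElem?_drop]
      rw [show 1 + (data.length - 2) = data.length - 1 from by omega, List.getElem?_map,
        List.getElem?_eq_getElem (by omega : data.length - 1 < data.length)]
      simp [pvVal, List.getLast_eq_getElem]
    rw [hV, hbl]
  · rw [dif_neg h2]
    have hz : data.length - 1 = 0 := by omega
    rw [hz]
    simp [PySem.List.pyRange_one_eq_nil (le_refl (0 : Int))]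

-- ===== VERDICT (by name: the statement is the Claim_ definition above) =====
theorem mk_utils_spec : Claim_equal_mk_utils := by
  intro data _ _
  unfold Spec_mk_utils
  rw [pvAclosed]
  by_cases h : 2 ≤ data.length
  · rw [dif_pos h, pvBclosed data h]
  · rw [dif_neg h]
    unfold mk_utils_alt
    rw [if_pos (by omega)]
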